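-- pv_equiv track=rewrite | github.com/h-dmt/Python_Fundamentals | Text_Processing/winning_ticket.py | check_combo
-- ===== SOURCE A (Python) =====
-- def check_combo(this_ticket):
--     win = False
--     comb = []
--     previous = ''
--     count = 1
--     win_symb = ''
--     for symbol in this_ticket:
--         if symbol == '@' or symbol == '#' or symbol == '$' or symbol == '^':
--             if symbol == previous:
--                 count += 1
--             else:
--                 count = 1
--             #  check number of repetitions
--             if count == 6:
--                 win = True
--                 comb = [str(count), symbol]
--             elif count == 10:
--                 win = True
--                 comb = [str(count), symbol, 'Jackpot!']
--                 return win, comb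
--         previous = symbol
--     return win, comb
-- ===== SOURCE B (Python) =====
-- def check_combo(this_ticket):
--     win = False
--     comb = []
--     i = 0
--     n = len(this_ticket)
--     while i < n:
--         key = this_ticket[i]
--         j = i + 1
--         while j < n and this_ticket[j] == key:
--             j += 1
--         if key in '@#$^':
--             run = j - i
--             if run >= 10:
--                 return True, ['10', key, 'Jackpot!']
--             if run >= 6:
--                 win = True
--                 comb = ['6', key]
--         i = j
--     return win, comb
-- ===== Notes on version B (the rewrite author's own statement) =====
-- stated objective: alternative
-- what changed: B replaces A's per-character state machine (previous/count registers) with a two-pointer scan that isolates each maximal run of equal characters and decides the win from the run length directly.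
import Mathlib
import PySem

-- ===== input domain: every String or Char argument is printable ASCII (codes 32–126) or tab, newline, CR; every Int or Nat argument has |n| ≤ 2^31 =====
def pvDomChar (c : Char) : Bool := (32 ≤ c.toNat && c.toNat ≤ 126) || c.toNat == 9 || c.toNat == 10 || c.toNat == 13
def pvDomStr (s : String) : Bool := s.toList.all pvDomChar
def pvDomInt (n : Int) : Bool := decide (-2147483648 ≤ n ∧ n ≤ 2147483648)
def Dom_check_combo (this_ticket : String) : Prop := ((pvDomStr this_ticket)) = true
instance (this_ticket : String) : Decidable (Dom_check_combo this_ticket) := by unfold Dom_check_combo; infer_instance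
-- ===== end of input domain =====

-- B replaces A's per-character state machine (previous/count) with a two-pointer run-length scan; same value everywhere.

-- ===== PORT A =====
-- A's loop: state (win, comb, previous, count); 'previous' starts as '' (modelled as none).
def checkComboGoA : List Char → Bool → List String → Option Char → Int → Bool × List String
  | [], win, comb, _, _ => (win, comb)
  | s :: rest, win, comb, prev, count =>
    if s = '@' ∨ s = '#' ∨ s = '$' ∨ s = '^' then
      let count' : Int := if some s = prev then count + 1 else 1
      if count' = 6 then
        checkComboGoA rest true [PySem.Int.toStr count', String.ofList [s]] (some s) count'
      else if count' = 10 then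
        (true, [PySem.Int.toStr count', String.ofList [s], "Jackpot!"])
      else
        checkComboGoA rest win comb (some s) count'
    else
      checkComboGoA rest win comb (some s) count

def check_combo (this_ticket : String) : Bool × List String :=
  checkComboGoA this_ticket.toList false [] none 1

-- ===== PORT B =====
-- B's outer while loop: peel off the maximal run at the front (the inner two-pointer while = takeWhile/dropWhile).
def checkComboGoB : List Char → Bool → List String → Bool × List String
  | [], win, comb => (win, comb)
  | c :: cs, win, comb =>
    let post := cs.dropWhile (· = c)
    if c = '@' ∨ c = '#' ∨ c = '$' ∨ c = '^' then
      let run : Int := 1 + (cs.takeWhile (· = c)).length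
      if run ≥ 10 then (true, ["10", String.ofList [c], "Jackpot!"])
      else if run ≥ 6 then checkComboGoB post true ["6", String.ofList [c]]
      else checkComboGoB post win comb
    else checkComboGoB post win comb
  termination_by xs => xs.length
  decreasing_by all_goals
    exact Nat.lt_succ_of_le (List.length_dropWhile_le _ _)

def check_combo_alt (this_ticket : String) : Bool × List String :=
  checkComboGoB this_ticket.toList false []

-- ===== PRECONDITION & SPEC =====
def Spec_check_combo (this_ticket : String) (out : Bool × List String) : Prop := out = check_combo_alt this_ticket
instance (this_ticket : String) (out : Bool × List String) : Decidable (Spec_check_combo this_ticket out) := by unfold Spec_check_combo; infer_instance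

-- ===== CLAIM (what is proved, stated in full; the proofs are below) =====
def Claim_equal_check_combo : Prop := ∀ (this_ticket : String), Dom_check_combo this_ticket → Spec_check_combo this_ticket (check_combo this_ticket)

-- ===== LEMMAS AND PROOFS =====

-- Inside a run of special char s: count goes j+1, …, j+m; the '6' snapshot fires iff 6 is hit, jackpot iff 10 is hit.
theorem goA_spec_run (s : Char) (hs : s = '@' ∨ s = '#' ∨ s = '$' ∨ s = '^') :
    ∀ (m : Nat) (j : Int) (win : Bool) (comb : List String) (rest : List Char),
      1 ≤ j → j ≤ 9 →
      checkComboGoA (List.replicate m s ++ rest) win comb (some s) j =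
        if j + (m : Int) ≥ 10 then (true, ["10", String.ofList [s], "Jackpot!"])
        else if j < 6 ∧ j + (m : Int) ≥ 6 then
          checkComboGoA rest true ["6", String.ofList [s]] (some s) (j + m)
        else checkComboGoA rest win comb (some s) (j + m) := by
  intro m
  induction m with
  | zero =>
    intro j win comb rest h1 h9
    simp only [List.replicate, List.nil_append, Nat.cast_zero, add_zero]
    rw [if_neg (by omega), if_neg (by omega)]
  | succ m ih =>
    intro j win comb rest h1 h9
    rw [List.replicate_succ, List.cons_append]
    simp only [checkComboGoA, if_pos hs, reduceIte]
    have hc : (j : Int) + 1 + (m : Int) = j + ((m+1 : Nat) : Int) := by push_cast; omega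
    by_cases h6 : j + 1 = 6
    · have e6 : PySem.Int.toStr (j+1) = "6" := by rw [h6]; decide
      rw [if_pos h6, e6, ih (j+1) true ["6", String.ofList [s]] rest (by omega) (by omega), hc]
      split_ifs with hA hB hC <;> first | rfl | (exfalso; omega)
    · rw [if_neg h6]
      by_cases h10 : j + 1 = 10
      · have e10 : PySem.Int.toStr (j+1) = "10" := by rw [h10]; decide
        rw [if_pos h10, e10, if_pos (show (j : Int) + ((m+1 : Nat) : Int) ≥ 10 by push_cast; omega)]
      · rw [if_neg h10, ih (j+1) win comb rest (by omega) (by omega), hc]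
        split_ifs with hA hB hC hD <;> first | rfl | (exfalso; omega)

-- A run of a non-special char only updates 'previous'.
theorem goA_nonspec_run (t : Char) (ht : ¬ (t = '@' ∨ t = '#' ∨ t = '$' ∨ t = '^')) :
    ∀ (m : Nat) (prev : Option Char) (win : Bool) (comb : List String) (rest : List Char) (k : Int),
      checkComboGoA (List.replicate (m+1) t ++ rest) win comb prev k =
        checkComboGoA rest win comb (some t) k := by
  intro m
  induction m with
  | zero => intro prev win comb rest k; simp [checkComboGoA, if_neg ht]
  | succ m ih =>
    intro prev win comb rest k
    rw [List.replicate_succ, List.cons_append]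
    simp only [checkComboGoA, if_neg ht]
    exact ih (some t) win comb rest k

theorem head_dropWhile_ne {c : Char} (cs : List Char) :
    ∀ d, (cs.dropWhile (· = c)).head? = some d → d ≠ c := by
  intro d hd
  have := List.head?_dropWhile_not (p := (· = c)) (l := cs)
  rw [hd] at this
  simpa using this

-- Main invariant: whenever 'previous' differs from the head char, A's state machine equals B's run scan.
theorem goA_eq_goB :
    ∀ (n : Nat) (xs : List Char), xs.length ≤ n →
      ∀ (win : Bool) (comb : List String) (prev : Option Char) (k : Int),
      (∀ c, xs.head? = some c → prev ≠ some c) →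
      checkComboGoA xs win comb prev k = checkComboGoB xs win comb := by
  intro n
  induction n with
  | zero =>
    intro xs hlen win comb prev k _
    have : xs = [] := List.eq_nil_of_length_eq_zero (Nat.le_zero.mp hlen)
    subst this
    simp [checkComboGoA, checkComboGoB]
  | succ n ih =>
    intro xs hlen win comb prev k hprev
    match xs with
    | [] => simp [checkComboGoA, checkComboGoB]
    | c :: cs =>
      have hprevc : prev ≠ some c := hprev c rfl
      have hpre_rep : cs.takeWhile (· = c) =
          List.replicate (cs.takeWhile (· = c)).length c :=
        List.eq_replicate_of_mem (fun b hb => by simpa using List.mem_takeWhile_imp hb)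
      have hcs : cs = List.replicate (cs.takeWhile (· = c)).length c ++ cs.dropWhile (· = c) := by
        conv_lhs => rw [← List.takeWhile_append_dropWhile (p := (· = c)) (l := cs)]
        congr 1
      have hpostlen : (cs.dropWhile (· = c)).length ≤ n := by
        have h1 : (cs.dropWhile (· = c)).length ≤ cs.length := List.length_dropWhile_le _ _
        simp only [List.length_cons] at hlen
        omega
      have hposthead : ∀ d, (cs.dropWhile (· = c)).head? = some d → (some c : Option Char) ≠ some d := by
        intro d hd
        have := head_dropWhile_ne (c := c) cs d hd
        simp [this.symm]
      by_cases hs : c = '@' ∨ c = '#' ∨ c = '$' ∨ c = '^'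
      · -- special char: the first element resets count to 1, goA_spec_run digests the run
        conv_rhs => rw [checkComboGoB]
        have hstep : checkComboGoA (c :: cs) win comb prev k =
            checkComboGoA cs win comb (some c) 1 := by
          simp only [checkComboGoA, if_pos hs, if_neg (Ne.symm hprevc)]
          norm_num
        rw [hstep]
        conv_lhs => rw [hcs]
        rw [goA_spec_run c hs (cs.takeWhile (· = c)).length 1 win comb (cs.dropWhile (· = c))
          (by omega) (by omega)]
        simp only [if_pos hs]
        split_ifs with hA hB hC hD <;> first
          | rfl
          | omega
          | exact ih _ hpostlen true _ (some c) _ hposthead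
          | exact ih _ hpostlen win comb (some c) _ hposthead
      · -- non-special char: the whole run only moves 'previous'
        conv_rhs => rw [checkComboGoB]
        simp only [if_neg hs]
        have hrep : c :: cs =
            List.replicate ((cs.takeWhile (· = c)).length + 1) c ++ cs.dropWhile (· = c) := by
          rw [List.replicate_succ, List.cons_append, ← hcs]
        conv_lhs => rw [hrep]
        rw [goA_nonspec_run c hs _ prev win comb _ k]
        exact ih _ hpostlen win comb (some c) k hposthead

-- ===== VERDICT (by name: the statement is the Claim_ definition above) =====
theorem check_combo_spec : Claim_equal_check_combo := by
  intro this_ticket _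
  unfold Spec_check_combo check_combo check_combo_alt
  exact goA_eq_goB this_ticket.toList.length this_ticket.toList le_rfl false [] none 1
    (by intro c _; simp)
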